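-- pv_equiv track=rewrite | github.com/liuminxin45/neo-skill | .shared/skill-creator/scripts/search.py | search_csv
-- ===== SOURCE A (Python) =====
-- from typing import Any, Dict, List, Optional
--
-- def search_csv(data: List[Dict[str, str]], query: str, fields: Optional[List[str]] = None) -> List[Dict[str, str]]:
--     """Search CSV data for matching rows."""
--     query_lower = query.lower()
--     keywords = query_lower.split()
--     results = []
--
--     for row in data:
--         score = 0
--         search_fields = fields or list(row.keys())
--         text = " ".join(str(row.get(f, "")) for f in search_fields).lower()
--
--         for kw in keywords:
--             if kw in text:
--                 score += 1
--
--         if score > 0: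
--             results.append((score, row))
--
--     results.sort(key=lambda x: -x[0])
--     return [r[1] for r in results]
-- ===== SOURCE B (Python) =====
-- from typing import Dict, List, Optional
--
-- def search_csv(data: List[Dict[str, str]], query: str, fields: Optional[List[str]] = None) -> List[Dict[str, str]]:
--     """Search CSV data for matching rows (score-level sweep instead of a comparison sort)."""
--     keywords = query.lower().split()
--     scored = []
--     for row in data:
--         names = fields or list(row.keys())
--         text = " ".join(str(row.get(f, "")) for f in names).lower()
--         scored.append((sum(kw in text for kw in keywords), row))
--     out = []
--     for s in range(len(keywords), 0, -1):
--         out.extend(row for sc, row in scored if sc == s)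
--     return out
-- ===== Notes on version B (the rewrite author's own statement) =====
-- stated objective: alternative
-- what changed: The collect-(score,row)-tuples-then-stable-comparison-sort of A is replaced by a pigeonhole sweep: score each row once, then emit rows by iterating score levels from len(keywords) down to 1, which reproduces the stable descending order without sorting.
import Mathlib
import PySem

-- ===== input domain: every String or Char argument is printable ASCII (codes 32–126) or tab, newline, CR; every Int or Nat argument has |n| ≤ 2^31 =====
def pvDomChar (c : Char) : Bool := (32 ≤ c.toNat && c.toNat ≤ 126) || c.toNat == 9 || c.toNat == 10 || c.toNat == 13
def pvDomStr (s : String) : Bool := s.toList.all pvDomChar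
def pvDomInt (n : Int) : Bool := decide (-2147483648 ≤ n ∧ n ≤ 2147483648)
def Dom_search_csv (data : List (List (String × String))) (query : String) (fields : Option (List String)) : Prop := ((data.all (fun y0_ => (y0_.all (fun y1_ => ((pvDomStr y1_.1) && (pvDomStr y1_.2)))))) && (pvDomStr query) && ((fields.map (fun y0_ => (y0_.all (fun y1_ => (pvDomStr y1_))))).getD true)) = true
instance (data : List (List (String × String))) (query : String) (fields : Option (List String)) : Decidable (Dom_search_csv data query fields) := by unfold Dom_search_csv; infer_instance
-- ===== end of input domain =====

-- ===== PORT A =====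
-- B keeps A's per-row scoring; the change is in how the rows are ordered (see PORT B).
-- shared A/B helper: text = " ".join(str(row.get(f, "")) for f in (fields or list(row.keys()))).lower()
def pvRowText (row : List (String × String)) (fields : Option (List String)) : String :=
  let sf : List String :=
    match fields with
    | some fs => if fs.isEmpty then (PySem.Dict.mk row).keys else fs
    | none => (PySem.Dict.mk row).keys
  PySem.Str.lower (PySem.Str.join " " (sf.map (fun f => PySem.Dict.getD (PySem.Dict.mk row) f "")))

def search_csv (data : List (List (String × String))) (query : String) (fields : Option (List String)) : List (List (String × String)) :=
  let query_lower := PySem.Str.lower query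
  let keywords := PySem.Str.split₀ query_lower
  let results : List (Int × List (String × String)) :=
    data.foldl (fun results row =>
      let text := pvRowText row fields
      let score : Int := keywords.foldl (fun score kw => if PySem.Str.isIn kw text then score + 1 else score) 0
      if score > 0 then results ++ [(score, row)] else results) []
  (PySem.List.sorted results (fun x => -x.1)).map (fun r => r.2)

-- ===== PORT B =====
def search_csv_alt (data : List (List (String × String))) (query : String) (fields : Option (List String)) : List (List (String × String)) :=
  let keywords := PySem.Str.split₀ (PySem.Str.lower query)
  let scored : List (Int × List (String × String)) :=
    data.foldl (fun scored row =>
      let text := pvRowText row fields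
      scored ++ [(keywords.foldl (fun n kw => n + (if PySem.Str.isIn kw text then (1 : Int) else 0)) 0, row)]) []
  (PySem.List.pyRange (keywords.length : Int) 0 (-1)).foldl
    (fun out s => out ++ (scored.filter (fun p => p.1 == s)).map (fun p => p.2)) []

-- ===== PRECONDITION & SPEC =====
def Spec_search_csv (data : List (List (String × String))) (query : String) (fields : Option (List String)) (out : List (List (String × String))) : Prop := out = search_csv_alt data query fields
instance (data : List (List (String × String))) (query : String) (fields : Option (List String)) (out : List (List (String × String))) : Decidable (Spec_search_csv data query fields out) := by unfold Spec_search_csv; infer_instance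

-- ===== CLAIM (what is proved, stated in full; the proofs are below) =====
def Claim_equal_search_csv : Prop := ∀ (data : List (List (String × String))) (query : String) (fields : Option (List String)), Dom_search_csv data query fields → Spec_search_csv data query fields (search_csv data query fields)

-- ===== LEMMAS AND PROOFS =====

-- the two scoring folds (count-by-branch vs sum-of-indicators) agree
theorem pv_score_eq (kws : List String) (text : String) : ∀ (a : Int),
    kws.foldl (fun score kw => if PySem.Str.isIn kw text then score + 1 else score) a
      = kws.foldl (fun n kw => n + (if PySem.Str.isIn kw text then (1 : Int) else 0)) a := by
  induction kws with
  | nil => intro a; rfl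
  | cons k t ih =>
    intro a
    rw [List.foldl_cons, List.foldl_cons]
    by_cases h : PySem.Str.isIn k text
    · rw [if_pos h, if_pos h, ih]
    · rw [if_neg h, if_neg h, add_zero, ih]

-- the scoring fold is bounded by the number of keywords
theorem pv_score_bound (kws : List String) (text : String) : ∀ (a : Int),
    a ≤ kws.foldl (fun score kw => if PySem.Str.isIn kw text then score + 1 else score) a ∧
    kws.foldl (fun score kw => if PySem.Str.isIn kw text then score + 1 else score) a ≤ a + kws.length := by
  induction kws with
  | nil => intro a; simp
  | cons k t ih =>
    intro a
    rw [List.foldl_cons]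
    by_cases h : PySem.Str.isIn k text
    · rw [if_pos h]
      have h1 := (ih (a+1)).1
      have h2 := (ih (a+1)).2
      constructor
      · omega
      · simp only [List.length_cons]; push_cast; omega
    · rw [if_neg h]
      have h1 := (ih a).1
      have h2 := (ih a).2
      constructor
      · omega
      · simp only [List.length_cons]; push_cast; omega

-- A's collecting loop is map-then-filter
theorem pv_A_loop {α : Type} (l : List α) (sc : α → Int) : ∀ (acc : List (Int × α)),
    l.foldl (fun res row => if sc row > 0 then res ++ [(sc row, row)] else res) acc
      = acc ++ (l.map (fun row => (sc row, row))).filter (fun p => decide (p.1 > 0)) := by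
  induction l with
  | nil => intro acc; simp
  | cons x t ih =>
    intro acc
    simp only [List.foldl_cons, List.map_cons, List.filter_cons]
    by_cases h : sc x > 0 <;> simp [h, ih]

-- B's collecting loop is a map
theorem pv_B_loop {α : Type} (l : List α) (sc : α → Int) : ∀ (acc : List (Int × α)),
    l.foldl (fun res row => res ++ [(sc row, row)]) acc = acc ++ l.map (fun row => (sc row, row)) := by
  induction l with
  | nil => intro acc; simp
  | cons x t ih => intro acc; simp [ih]

-- B's output loop is a flatMap
theorem pv_foldl_append_flatMap {α β : Type} (l : List α) (g : α → List β) : ∀ (acc : List β),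
    l.foldl (fun out s => out ++ g s) acc = acc ++ l.flatMap g := by
  induction l with
  | nil => intro acc; simp
  | cons x t ih => intro acc; simp [ih]

theorem pv_flatMap_congr {α β : Type} {l : List α} {f g : α → List β}
    (h : ∀ a ∈ l, f a = g a) : l.flatMap f = l.flatMap g := by
  induction l with
  | nil => simp
  | cons x t ih =>
    simp only [List.flatMap_cons]
    rw [h x (by simp), ih (fun a ha => h a (by simp [ha]))]

theorem pv_insertBy_skip {α : Type} (before : α → α → Bool) (x : α) (l1 l2 : List α)
    (h : ∀ y ∈ l1, before x y = false) :
    PySem.List.insertBy before x (l1 ++ l2) = l1 ++ PySem.List.insertBy before x l2 := by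
  induction l1 with
  | nil => simp
  | cons y t ih =>
    have hy := h y (by simp)
    simp only [List.cons_append, PySem.List.insertBy, hy]
    simp [ih (fun z hz => h z (by simp [hz]))]

theorem pv_insertBy_front {α : Type} (before : α → α → Bool) (x : α) (l : List α)
    (h : ∀ y ∈ l.take 1, before x y = true) :
    PySem.List.insertBy before x l = x :: l := by
  cases l with
  | nil => rfl
  | cons y t =>
    have hy := h y (by simp)
    simp [PySem.List.insertBy, hy]

-- the stable insertion sort by descending score equals the score-level sweep
theorem pv_bucket {ρ : Type} (K : Nat) : ∀ (ys : List (Int × ρ)),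
    (∀ p ∈ ys, 0 < p.1 ∧ p.1 ≤ (K : Int)) →
    ys.foldl (fun acc x => PySem.List.insertBy (fun a b => decide ((-a.1 : Int) < -b.1)) x acc) [] =
    (PySem.List.pyRange (K : Int) 0 (-1)).flatMap (fun s => ys.filter (fun p => p.1 == s)) := by
  intro ys
  induction ys using List.reverseRecOn with
  | nil => intro _; simp
  | append_singleton ys x ih =>
    intro hb
    have hx := hb x (by simp)
    have hys : ∀ p ∈ ys, 0 < p.1 ∧ p.1 ≤ (K : Int) := fun p hp => hb p (by simp [hp])
    rw [List.foldl_append, List.foldl_cons, List.foldl_nil, ih hys]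
    obtain ⟨hx1, hx2⟩ := hx
    have hsplit : PySem.List.pyRange 1 ((K : Int) + 1) 1
        = PySem.List.pyRange 1 x.1 1 ++ x.1 :: PySem.List.pyRange (x.1 + 1) ((K : Int) + 1) 1 := by
      have hcons : PySem.List.pyRange x.1 ((K : Int) + 1) 1
          = x.1 :: PySem.List.pyRange (x.1 + 1) ((K : Int) + 1) 1 :=
        PySem.List.pyRange_one_cons (by omega)
      rw [PySem.List.pyRange_one_append 1 x.1 ((K : Int) + 1) (by omega) (by omega), hcons]
    have hr : PySem.List.pyRange (K : Int) 0 (-1)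
        = (PySem.List.pyRange (x.1 + 1) ((K : Int) + 1) 1).reverse
          ++ x.1 :: (PySem.List.pyRange 1 x.1 1).reverse := by
      rw [PySem.List.pyRange_neg_one_eq_reverse, zero_add, hsplit]
      simp
    rw [hr]
    simp only [List.flatMap_append, List.flatMap_cons]
    -- the new element x does not land in the high or low buckets
    have hHi : (PySem.List.pyRange (x.1 + 1) ((K : Int) + 1) 1).reverse.flatMap
          (fun s => (ys ++ [x]).filter (fun p => p.1 == s))
        = (PySem.List.pyRange (x.1 + 1) ((K : Int) + 1) 1).reverse.flatMap
          (fun s => ys.filter (fun p => p.1 == s)) := by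
      apply pv_flatMap_congr
      intro s hs
      rw [List.mem_reverse, PySem.List.mem_pyRange_one] at hs
      have hne : ¬ (x.1 = s) := by omega
      simp [List.filter_append, hne]
    have hLo : (PySem.List.pyRange 1 x.1 1).reverse.flatMap
          (fun s => (ys ++ [x]).filter (fun p => p.1 == s))
        = (PySem.List.pyRange 1 x.1 1).reverse.flatMap
          (fun s => ys.filter (fun p => p.1 == s)) := by
      apply pv_flatMap_congr
      intro s hs
      rw [List.mem_reverse, PySem.List.mem_pyRange_one] at hs
      have hne : ¬ (x.1 = s) := by omega
      simp [List.filter_append, hne]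
    have hMid : (ys ++ [x]).filter (fun p => p.1 == x.1)
        = ys.filter (fun p => p.1 == x.1) ++ [x] := by
      simp [List.filter_append]
    rw [hHi, hLo, hMid]
    -- insert x: it passes the high buckets and the x.1-bucket, then lands in front of the rest
    rw [pv_insertBy_skip _ x _ _ (by
      intro y hy
      rcases List.mem_flatMap.1 hy with ⟨s, hs, hyf⟩
      rw [List.mem_reverse, PySem.List.mem_pyRange_one] at hs
      have hy1 : y.1 = s := by simpa using (List.of_mem_filter hyf)
      simp only [decide_eq_false_iff_not]
      omega)]
    rw [pv_insertBy_skip _ x _ _ (by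
      intro y hy
      have hy1 : y.1 = x.1 := by simpa using (List.of_mem_filter hy)
      simp only [decide_eq_false_iff_not]
      omega)]
    rw [pv_insertBy_front _ x _ (by
      intro y hy
      have hy' := List.mem_of_mem_take hy
      rcases List.mem_flatMap.1 hy' with ⟨s, hs, hyf⟩
      rw [List.mem_reverse, PySem.List.mem_pyRange_one] at hs
      have hy1 : y.1 = s := by simpa using (List.of_mem_filter hyf)
      simp only [decide_eq_true_eq]
      omega)]
    simp

-- the whole pipeline, for an arbitrary keyword list and per-row text function
theorem pv_main {α : Type} (kws : List String) (l : List α) (tx : α → String) :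
    (PySem.List.sorted (l.foldl (fun results row =>
        if kws.foldl (fun score kw => if PySem.Str.isIn kw (tx row) then score + 1 else score) (0 : Int) > 0
        then results ++ [(kws.foldl (fun score kw => if PySem.Str.isIn kw (tx row) then score + 1 else score) (0 : Int), row)]
        else results) []) (fun x => -x.1)).map (fun r => r.2)
    = (PySem.List.pyRange (kws.length : Int) 0 (-1)).foldl (fun out s =>
        out ++ ((l.foldl (fun scored row =>
            scored ++ [(kws.foldl (fun n kw => n + (if PySem.Str.isIn kw (tx row) then (1 : Int) else 0)) 0, row)]) []).filter
            (fun p => p.1 == s)).map (fun p => p.2)) [] := by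
  rw [pv_B_loop l (fun row => kws.foldl (fun n kw => n + (if PySem.Str.isIn kw (tx row) then (1 : Int) else 0)) 0) []]
  simp only [List.nil_append]
  have hsc : ∀ row, kws.foldl (fun n kw => n + (if PySem.Str.isIn kw (tx row) then (1 : Int) else 0)) 0
      = kws.foldl (fun score kw => if PySem.Str.isIn kw (tx row) then score + 1 else score) 0 :=
    fun row => (pv_score_eq kws (tx row) 0).symm
  simp only [hsc]
  rw [pv_A_loop l (fun row => kws.foldl (fun score kw => if PySem.Str.isIn kw (tx row) then score + 1 else score) (0 : Int)) []]
  simp only [List.nil_append]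
  rw [pv_foldl_append_flatMap _ (fun s =>
    (((l.map (fun row => (kws.foldl (fun score kw => if PySem.Str.isIn kw (tx row) then score + 1 else score) (0 : Int), row))).filter
      (fun p => p.1 == s)).map (fun p => p.2))) []]
  simp only [List.nil_append]
  rw [← List.map_flatMap]
  rw [PySem.List.sorted_eq_foldl_insertBy]
  -- restrict the per-level filters to the positive-score rows (every level in the range is positive)
  have hflt : (PySem.List.pyRange (kws.length : Int) 0 (-1)).flatMap (fun s =>
        (l.map (fun row => (kws.foldl (fun score kw => if PySem.Str.isIn kw (tx row) then score + 1 else score) (0 : Int), row))).filter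
          (fun p => p.1 == s))
      = (PySem.List.pyRange (kws.length : Int) 0 (-1)).flatMap (fun s =>
        ((l.map (fun row => (kws.foldl (fun score kw => if PySem.Str.isIn kw (tx row) then score + 1 else score) (0 : Int), row))).filter
          (fun p => decide (p.1 > 0))).filter (fun p => p.1 == s)) := by
    apply pv_flatMap_congr
    intro s hs
    rw [PySem.List.mem_pyRange_neg_one] at hs
    rw [List.filter_filter]
    apply List.filter_congr
    intro p _
    by_cases h : p.1 = s
    · simp [h]; omega
    · simp [h]
  rw [hflt]
  refine congrArg (List.map _) (pv_bucket kws.length _ ?_)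
  intro p hp
  have h1 := List.of_mem_filter hp
  have h2 := List.mem_of_mem_filter hp
  rcases List.mem_map.1 h2 with ⟨row, _, hrow⟩
  constructor
  · simpa using h1
  · have := (pv_score_bound kws (tx row) 0).2
    rw [← hrow]
    simpa using this

-- ===== VERDICT (by name: the statement is the Claim_ definition above) =====
theorem search_csv_spec : Claim_equal_search_csv := by
  intro data query fields _
  show search_csv data query fields = search_csv_alt data query fields
  exact pv_main (PySem.Str.split₀ (PySem.Str.lower query)) data (fun row => pvRowText row fields)
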